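-- pv_equiv track=rewrite | github.com/KS-HTK/adventOfCode23 | day04/day04.py | part2
-- ===== SOURCE A (Python) =====
-- def part2(winners: dict) -> int:
--   cardcount = 0
--   stack = {}
--   for k in winners.keys():
--     stack[k] = 1
--   for k in stack.keys():
--     cardcount += stack[k]
--     for i in range(1, winners[k]+1):
--       if k+i not in winners:
--         break
--       stack[k+i] += stack[k]
--   return cardcount
-- ===== SOURCE B (Python) =====
-- def part2(winners: dict) -> int:
--     total = 0
--     intervals = []  # (start, end, copies): cards in (start, end] gain `copies` extra copies
--     for k in winners:
--         copies = 1 + sum(c for (s, e, c) in intervals if s < k <= e)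
--         total += copies
--         reach = 0
--         while reach < winners[k] and (k + reach + 1) in winners:
--             reach += 1
--         intervals.append((k, k + reach, copies))
--     return total
-- ===== Notes on version B (the rewrite author's own statement) =====
-- stated objective: alternative
-- what changed: A eagerly cascades copy counts through a mutable per-card dict (stack[k+i] += stack[k] inner writes); B is pure and lazy: each card appends one (start, end, copies] interval and a card's count is 1 plus the sum of the earlier-recorded intervals covering its id, with the cascade reach found by a membership scan instead of dict mutation.
import Mathlib
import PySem

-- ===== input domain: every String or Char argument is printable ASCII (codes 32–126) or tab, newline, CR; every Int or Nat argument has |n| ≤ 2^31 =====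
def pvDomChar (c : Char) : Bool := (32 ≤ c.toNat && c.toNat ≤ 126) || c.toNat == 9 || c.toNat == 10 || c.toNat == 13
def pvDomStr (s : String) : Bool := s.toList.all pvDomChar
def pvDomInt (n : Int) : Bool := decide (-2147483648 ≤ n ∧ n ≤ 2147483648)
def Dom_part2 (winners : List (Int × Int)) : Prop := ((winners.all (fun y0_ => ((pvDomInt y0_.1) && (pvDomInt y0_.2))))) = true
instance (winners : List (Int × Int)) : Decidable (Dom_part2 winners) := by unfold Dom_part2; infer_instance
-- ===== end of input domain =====

-- B replaces A's eagerly mutated copy-count dict with a pure lazy interval-sum scheme; same worst-case cost ("alternative").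
-- The dict argument arrives as an association list in insertion order; both ports rebuild it with PySem.Dict.ofList.

-- ===== PORT A =====
-- inner 'for i in range(1, winners[k]+1): if k+i not in winners: break; stack[k+i] += stack[k]'
-- (range ported as a counter loop, faithful to Python's lazy range; stack[k] / stack[k+i] are
-- always present when read, so getD/modify with default 0 is exact)
def part2Inner (w : PySem.Dict Int Int) (k : Int) (wv : Int) (st : PySem.Dict Int Int) (i : Int) : PySem.Dict Int Int :=
  if _h : i < wv + 1 then
    if w.contains (k + i) then
      part2Inner w k wv (st.modify (k + i) 0 (fun x => x + st.getD k 0)) (i + 1)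
    else st
  else st
termination_by (wv + 1 - i).toNat
decreasing_by omega

def part2 (winners : List (Int × Int)) : Int :=
  let w := PySem.Dict.ofList winners
  let stack := w.keys.foldl (fun st k => st.insert k (1 : Int)) PySem.Dict.empty
  let res := stack.keys.foldl
    (fun (acc : Int × PySem.Dict Int Int) k =>
      (acc.1 + acc.2.getD k 0, part2Inner w k (w.getD k 0) acc.2 1))
    ((0 : Int), stack)
  res.1

-- ===== PORT B =====
-- 'reach = 0; while reach < winners[k] and (k + reach + 1) in winners: reach += 1'
def reachLoop (w : PySem.Dict Int Int) (k : Int) (wv : Int) (r : Int) : Int :=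
  if _h : r < wv ∧ w.contains (k + r + 1) then reachLoop w k wv (r + 1) else r
termination_by (wv - r).toNat
decreasing_by omega

def part2_alt (winners : List (Int × Int)) : Int :=
  let w := PySem.Dict.ofList winners
  let res := w.items.foldl
    (fun (acc : Int × List (Int × Int × Int)) kv =>
      let copies : Int := 1 + acc.2.foldl (fun s t => if t.1 < kv.1 ∧ kv.1 ≤ t.2.1 then s + t.2.2 else s) 0
      let reach := reachLoop w kv.1 (w.getD kv.1 0) 0
      (acc.1 + copies, acc.2 ++ [(kv.1, kv.1 + reach, copies)]))
    ((0 : Int), ([] : List (Int × Int × Int)))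
  res.1

-- ===== PRECONDITION & SPEC =====
def Spec_part2 (winners : List (Int × Int)) (out : Int) : Prop := out = part2_alt winners
instance (winners : List (Int × Int)) (out : Int) : Decidable (Spec_part2 winners out) := by unfold Spec_part2; infer_instance

-- ===== CLAIM (what is proved, stated in full; the proofs are below) =====
def Claim_equal_part2 : Prop := ∀ (winners : List (Int × Int)), Dom_part2 winners → Spec_part2 winners (part2 winners)

-- ===== LEMMAS AND PROOFS =====

-- B's per-card interval query, as a recursive sum
def qsum : List (Int × Int × Int) → Int → Int
  | [], _ => 0
  | t :: tl, k => (if t.1 < k ∧ k ≤ t.2.1 then t.2.2 else 0) + qsum tl k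

theorem foldl_eq_qsum (k : Int) : ∀ (iv : List (Int × Int × Int)) (s : Int),
    iv.foldl (fun s t => if t.1 < k ∧ k ≤ t.2.1 then s + t.2.2 else s) s = s + qsum iv k := by
  intro iv
  induction iv with
  | nil => intro s; simp [qsum]
  | cons t tl ih =>
    intro s
    simp only [List.foldl, qsum]
    rw [ih]
    split <;> omega

theorem qsum_append_singleton (iv : List (Int × Int × Int)) (t : Int × Int × Int) (k : Int) :
    qsum (iv ++ [t]) k = qsum iv k + (if t.1 < k ∧ k ≤ t.2.1 then t.2.2 else 0) := by
  induction iv with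
  | nil => simp [qsum]
  | cons h tl ih => simp only [List.cons_append, qsum, ih]; omega

theorem reachLoop_ge (w : PySem.Dict Int Int) (k : Int) : ∀ (n : ℕ) (wv r : Int),
    n = (wv - r).toNat → r ≤ reachLoop w k wv r := by
  intro n
  induction n with
  | zero =>
    intro wv r hn
    rw [reachLoop]
    split
    · omega
    · omega
  | succ m ih =>
    intro wv r hn
    rw [reachLoop]
    split
    · rename_i h
      have := ih wv (r + 1) (by omega)
      omega
    · omega

-- A's inner cascade adds st.getD k 0 to exactly the keys in the half-open run (k+r, k+reach]
theorem inner_spec (w : PySem.Dict Int Int) (k : Int) : ∀ (n : ℕ) (wv r : Int)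
    (st : PySem.Dict Int Int) (q : Int), n = (wv - r).toNat → 0 ≤ r →
    (part2Inner w k wv st (r + 1)).getD q 0
      = st.getD q 0 + (if k + r < q ∧ q ≤ k + reachLoop w k wv r then st.getD k 0 else 0) := by
  intro n
  induction n with
  | zero =>
    intro wv r st q hn hr
    have hvr : wv ≤ r := by omega
    rw [part2Inner]
    rw [reachLoop]
    have h1 : ¬ (r + 1 < wv + 1) := by omega
    have h2 : ¬ (r < wv ∧ w.contains (k + r + 1)) := by intro h; omega
    simp only [h1, dite_false, h2]
    split
    · omega
    · omega
  | succ m ih =>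
    intro wv r st q hn hr
    by_cases hvr : r < wv
    · rw [part2Inner, reachLoop]
      have h1 : r + 1 < wv + 1 := by omega
      simp only [h1, dite_true]
      have hadd : k + (r + 1) = k + r + 1 := by ring
      rw [hadd]
      by_cases hc : w.contains (k + r + 1)
      · rw [if_pos hc]
        have hand : r < wv ∧ w.contains (k + r + 1) = true := ⟨hvr, hc⟩
        rw [dif_pos hand]
        set st' := st.modify (k + r + 1) 0 (fun x => x + st.getD k 0) with hst'
        have hrec := ih wv (r + 1) st' q (by omega) (by omega)
        rw [hrec]
        have hkk : k ≠ k + r + 1 := by omega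
        have hgk : st'.getD k 0 = st.getD k 0 := by
          rw [hst', PySem.Dict.getD_modify]
          simp [hkk]
        have hgq : st'.getD q 0 = if q = k + r + 1 then st.getD (k + r + 1) 0 + st.getD k 0 else st.getD q 0 := by
          rw [hst', PySem.Dict.getD_modify]
        rw [hgk, hgq]
        have hge : r + 1 ≤ reachLoop w k wv (r + 1) := reachLoop_ge w k (wv - (r+1)).toNat wv (r+1) rfl
        by_cases hq : q = k + r + 1
        · subst hq
          split_ifs <;> omega
        · rw [if_neg hq]
          split_ifs <;> omega
      · rw [if_neg hc]
        have hand : ¬ (r < wv ∧ w.contains (k + r + 1)) := by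
          intro h; exact absurd h.2 (by simpa using hc)
        rw [dif_neg hand]
        have : ¬ (k + r < q ∧ q ≤ k + r) := by omega
        simp [this]
    · rw [part2Inner, reachLoop]
      have h1 : ¬ (r + 1 < wv + 1) := by omega
      have h2 : ¬ (r < wv ∧ w.contains (k + r + 1)) := by intro h; omega
      simp only [h1, dite_false, h2]
      have : ¬ (k + r < q ∧ q ≤ k + r) := by omega
      simp [this]

-- main loop correspondence: A's fold over (key, value) items with the mutable stack
-- versus B's fold with the interval list, under the invariant
-- "stack[q] = 1 + (sum of recorded intervals covering q)" for every key q
theorem main_fold (w : PySem.Dict Int Int) :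
    ∀ (l : List (Int × Int)) (tA tB : Int) (st : PySem.Dict Int Int) (iv : List (Int × Int × Int)),
    (∀ p ∈ l, p.1 ∈ w.keys) →
    tA = tB →
    (∀ q, q ∈ w.keys → st.getD q 0 = 1 + qsum iv q) →
    (l.foldl (fun (acc : Int × PySem.Dict Int Int) p =>
        (acc.1 + acc.2.getD p.1 0, part2Inner w p.1 (w.getD p.1 0) acc.2 1)) (tA, st)).1
    = (l.foldl (fun (acc : Int × List (Int × Int × Int)) kv =>
        let copies : Int := 1 + acc.2.foldl (fun s t => if t.1 < kv.1 ∧ kv.1 ≤ t.2.1 then s + t.2.2 else s) 0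
        let reach := reachLoop w kv.1 (w.getD kv.1 0) 0
        (acc.1 + copies, acc.2 ++ [(kv.1, kv.1 + reach, copies)])) (tB, iv)).1 := by
  intro l
  induction l with
  | nil => intro tA tB st iv _ ht _; simpa using ht
  | cons p rest ih =>
    intro tA tB st iv hmem ht hinv
    simp only [List.foldl]
    have hk : p.1 ∈ w.keys := hmem p (List.mem_cons_self ..)
    have hstk : st.getD p.1 0 = 1 + qsum iv p.1 := hinv p.1 hk
    apply ih
    · intro q hq; exact hmem q (List.mem_cons_of_mem _ hq)
    · rw [foldl_eq_qsum]; omega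
    · intro q hq
      have hspec := inner_spec w p.1 ((w.getD p.1 0) - 0).toNat (w.getD p.1 0) 0 st q rfl le_rfl
      rw [zero_add] at hspec
      rw [hspec]
      rw [foldl_eq_qsum, qsum_append_singleton]
      simp only [add_zero]
      rw [hinv q hq, hstk]
      split <;> omega

theorem stack_init (w : PySem.Dict Int Int) (hnd : w.keys.Nodup) :
    ∀ q ∈ w.keys,
      (w.keys.foldl (fun st k => st.insert k (1 : Int)) PySem.Dict.empty).getD q 0 = 1 := by
  intro q hq
  have hfresh : ∀ a ∈ w.keys, (PySem.Dict.empty : PySem.Dict Int Int).contains (id a) = false := by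
    intro a _; simp [PySem.Dict.contains_empty]
  have hitems := PySem.Dict.items_foldl_insert_fresh (l := w.keys) (k := id)
      (v := fun _ => (1 : Int)) (d := PySem.Dict.empty) hfresh (by simpa using hnd)
  have hie : (PySem.Dict.empty : PySem.Dict Int Int).items = [] := rfl
  simp only [id, hie, List.nil_append] at hitems
  apply PySem.Dict.getD_of_mem_items
  · rw [hitems]; exact List.mem_map.mpr ⟨q, hq, rfl⟩
  · show (_ : PySem.Dict Int Int).items.map Prod.fst |>.Nodup
    rw [hitems, List.map_map]
    have hmapid : (List.map (Prod.fst ∘ fun a => (a, (1 : Int))) w.keys) = w.keys := by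
      simp [Function.comp_def]
    rw [hmapid]
    exact hnd

theorem stack_keys (w : PySem.Dict Int Int) :
    (w.keys.foldl (fun st k => st.insert k (1 : Int)) PySem.Dict.empty).keys
      = PySem.Set.update (PySem.Dict.empty : PySem.Dict Int Int).keys w.keys := by
  exact PySem.Dict.keys_foldl_insert w.keys (fun st k => (1 : Int)) PySem.Dict.empty

-- ===== VERDICT (by name: the statement is the Claim_ definition above) =====
theorem part2_spec : Claim_equal_part2 := by
  unfold Claim_equal_part2
  intro winners _
  unfold Spec_part2 part2 part2_alt
  simp only []
  set w := PySem.Dict.ofList winners with hw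
  have hnd : w.keys.Nodup := PySem.Dict.nodup_keys_ofList winners
  have hkeys : (w.keys.foldl (fun st k => st.insert k (1 : Int)) PySem.Dict.empty).keys = w.keys := by
    rw [stack_keys]
    have hke : (PySem.Dict.empty : PySem.Dict Int Int).keys = [] := rfl
    rw [hke, PySem.Set.update_nil_left, PySem.Set.ofList_eq_self_of_nodup _ hnd]
  rw [hkeys]
  have hkm : w.keys = w.items.map Prod.fst := rfl
  rw [hkm, List.foldl_map]
  apply main_fold
  · intro p hp; exact PySem.Dict.mem_keys_of_mem_items w hp
  · rfl
  · intro q hq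
    rw [← hkm]
    rw [stack_init w hnd q hq]
    simp [qsum]
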